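-- pv_equiv track=rewrite | github.com/jjuaristi/myGithub | python/calculadora/strings.py | int_to_str
-- ===== SOURCE A (Python) =====
-- def int_to_str (num):
--     int_str = str(int(num))
--     str_temp =''
--     j = 0
--     for i in range(len(int_str) -1, -1, -1):
--         if j < 3:
--             str_temp = int_str[i] + str_temp
--             j += 1
--         else:
--             str_temp = int_str[i] + '.' + str_temp
--             j = 1
--     return str_temp
-- ===== SOURCE B (Python) =====
-- def int_to_str(num):
--     s = str(int(num))
--     chunks = []
--     i = len(s)
--     while i > 0:
--         chunks.append(s[max(0, i - 3):i])
--         i -= 3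
--     return '.'.join(reversed(chunks))
-- ===== Notes on version B (the rewrite author's own statement) =====
-- stated objective: simpler
-- what changed: B replaces A's right-to-left character walk with a modulo-three counter and repeated string prepending by slicing the decimal string into chunks of three characters from the right and joining them with '.'.
import Mathlib
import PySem

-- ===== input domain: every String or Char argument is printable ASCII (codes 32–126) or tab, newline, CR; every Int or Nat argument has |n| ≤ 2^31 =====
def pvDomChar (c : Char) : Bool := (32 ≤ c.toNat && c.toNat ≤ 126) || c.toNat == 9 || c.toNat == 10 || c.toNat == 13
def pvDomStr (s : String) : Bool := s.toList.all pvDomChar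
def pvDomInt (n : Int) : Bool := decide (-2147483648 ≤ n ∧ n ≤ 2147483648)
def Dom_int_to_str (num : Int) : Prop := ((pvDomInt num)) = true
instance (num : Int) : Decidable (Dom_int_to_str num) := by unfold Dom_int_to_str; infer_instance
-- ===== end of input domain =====

-- B groups str(num) into chunks of three characters sliced from the right and joins them with '.',
-- instead of A's right-to-left character walk with a modulo-three counter; return values are equal.

-- ===== PORT A =====
-- the loop body of A (named helper for the in-loop code; same branches, same state (str_temp, j))
def pvStepA (intStr : List Char) (st : List Char × Int) (i : Int) : List Char × Int :=
  if st.2 < 3 then (PySem.List.pyGetD intStr i ' ' :: st.1, st.2 + 1)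
  else (PySem.List.pyGetD intStr i ' ' :: '.' :: st.1, 1)

def int_to_str (num : Int) : String :=
  -- int_str = str(int(num)); we keep its character list (toChars num = (toStr num).toList)
  let intStr : List Char := PySem.Int.toChars num
  -- for i in range(len(int_str)-1, -1, -1): … with state (str_temp, j) starting ('', 0)
  let r := (PySem.List.pyRange ((intStr.length : Int) - 1) (-1) (-1)).foldl (pvStepA intStr) ([], 0)
  String.ofList r.1

-- ===== PORT B =====
-- the while loop of B: while i > 0: chunks.append(s[max(0, i-3):i]); i -= 3
def pvChunks (s : List Char) (i : Int) : List (List Char) :=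
  if h : 0 < i then
    PySem.List.slice s (some (max 0 (i - 3))) (some i) :: pvChunks s (i - 3)
  else []
termination_by i.toNat
decreasing_by omega

def int_to_str_alt (num : Int) : String :=
  let s : List Char := PySem.Int.toChars num
  -- '.'.join(reversed(chunks))
  String.ofList (List.intercalate ['.'] ((pvChunks s (s.length : Int)).reverse))

-- ===== PRECONDITION & SPEC =====
def Spec_int_to_str (num : Int) (out : String) : Prop := out = int_to_str_alt num
instance (num : Int) (out : String) : Decidable (Spec_int_to_str num out) := by unfold Spec_int_to_str; infer_instance

-- ===== CLAIM (what is proved, stated in full; the proofs are below) =====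
def Claim_equal_int_to_str : Prop := ∀ (num : Int), Dom_int_to_str num → Spec_int_to_str num (int_to_str num)

-- ===== LEMMAS AND PROOFS =====

-- the common characterisation: group from the right into chunks of 3, '.' between chunks
def pvG (x : List Char) : List Char :=
  if x.length ≤ 3 then x
  else pvG (x.take (x.length - 3)) ++ '.' :: x.drop (x.length - 3)
termination_by x.length
decreasing_by simp; omega

lemma pvG_short (x : List Char) (h : x.length ≤ 3) : pvG x = x := by
  unfold pvG; simp [h]

lemma pvG_long (x : List Char) (h : 3 < x.length) :
    pvG x = pvG (x.take (x.length - 3)) ++ '.' :: x.drop (x.length - 3) := by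
  rw [pvG]; simp [Nat.not_le.mpr h]

lemma pvIntercalate_append_singleton (A : List (List Char)) (c : List Char) (h : A ≠ []) :
    List.intercalate ['.'] (A ++ [c]) = List.intercalate ['.'] A ++ '.' :: c := by
  induction A with
  | nil => simp at h
  | cons a t ih =>
    cases t with
    | nil => simp [List.intercalate]
    | cons b t' =>
      have step : ∀ (r : List (List Char)),
          List.intercalate ['.'] (a :: b :: r) = a ++ '.' :: List.intercalate ['.'] (b :: r) := by
        intro r; simp [List.intercalate]
      rw [show (a :: b :: t') ++ [c] = a :: b :: (t' ++ [c]) by simp, step,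
          ← List.cons_append, ih (by simp), step]
      simp

lemma pvChunks_ne_nil (s : List Char) (i : Int) (h : 0 < i) : pvChunks s i ≠ [] := by
  rw [pvChunks]; simp [h]

-- B computes pvG
lemma pvB_eq_pvG (s : List Char) (i : Nat) (hi : i ≤ s.length) :
    List.intercalate ['.'] ((pvChunks s (i : Int)).reverse) = pvG (s.take i) := by
  induction i using Nat.strong_induction_on with
  | _ i ih =>
    by_cases h0 : i = 0
    · subst h0
      rw [pvChunks]; simp [List.intercalate, pvG_short]
    · by_cases h3 : i ≤ 3
      · -- a single chunk: s[0:i]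
        rw [pvChunks, dif_pos (by omega : (0:Int) < i), pvChunks, dif_neg (by omega)]
        rw [show max 0 ((i : Int) - 3) = 0 by omega]
        simp only [PySem.List.slice_zero_start, PySem.List.slice_to_natCast]
        rw [List.reverse_cons, List.reverse_nil, List.nil_append]
        rw [show List.intercalate ['.'] [s.take i] = s.take i by simp [List.intercalate]]
        exact (pvG_short _ (by rw [List.length_take]; omega)).symm
      · -- i > 3: the rightmost chunk s[i-3:i] plus the rest
        push_neg at h3
        rw [pvChunks, dif_pos (by omega : (0:Int) < i)]
        rw [show max 0 ((i : Int) - 3) = ((i - 3 : Nat) : Int) by omega,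
            show (i : Int) - 3 = ((i - 3 : Nat) : Int) by omega,
            PySem.List.slice_natCast]
        have hne : pvChunks s ((i - 3 : Nat) : Int) ≠ [] := pvChunks_ne_nil _ _ (by omega)
        rw [List.reverse_cons, pvIntercalate_append_singleton _ _ (by simpa using hne)]
        rw [ih (i - 3) (by omega) (by omega)]
        have hlen : (s.take i).length = i := by rw [List.length_take]; omega
        rw [pvG_long (s.take i) (by omega), hlen, List.take_take, List.drop_take,
            show min (i - 3) i = i - 3 by omega]

-- pyGetD at an in-range natural index is getElem
lemma pvGet (l : List Char) (k : Nat) (hk : k < l.length) :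
    PySem.List.pyGetD l ((k : Nat) : Int) ' ' = l[k] := by
  simp [PySem.List.pyGetD_natCast, hk]

lemma pvTake1 (l : List Char) (h : 1 ≤ l.length) : l.take 1 = [l[0]'(by omega)] := by
  cases l with
  | nil => simp at h
  | cons a t => simp

lemma pvTake2 (l : List Char) (h : 2 ≤ l.length) :
    l.take 2 = [l[0]'(by omega), l[1]'(by omega)] := by
  cases l with
  | nil => simp at h
  | cons a t => cases t with
    | nil => simp at h
    | cons b t' => simp

lemma pvTake3 (l : List Char) (h : 3 ≤ l.length) :
    l.take 3 = [l[0]'(by omega), l[1]'(by omega), l[2]'(by omega)] := by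
  cases l with
  | nil => simp at h
  | cons a t => cases t with
    | nil => simp at h
    | cons b t' => cases t' with
      | nil => simp at h
      | cons c t'' => simp

-- the last three characters of the first m, as explicit elements
lemma pvDrop3 (l : List Char) (m : Nat) (h3 : 3 ≤ m) (hm : m ≤ l.length) :
    (l.drop (m-3)).take 3 = [l[m-3]'(by omega), l[m-2]'(by omega), l[m-1]'(by omega)] := by
  rw [pvTake3 (l.drop (m-3)) (by simp; omega)]
  simp [List.getElem_drop, show m-3+1 = m-2 from by omega, show m-3+2 = m-1 from by omega]

-- A's loop from state (acc, 3) over indices m-1 … 0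
lemma pvA_loop (l : List Char) (m : Nat) (h1 : 1 ≤ m) (hm : m ≤ l.length) (acc : List Char) :
    (PySem.List.pyRange ((m : Int) - 1) (-1) (-1)).foldl (pvStepA l) (acc, 3)
      = (pvG (l.take m) ++ '.' :: acc, (((m - 1) % 3 : Nat) : Int) + 1) := by
  induction m using Nat.strong_induction_on generalizing acc with
  | _ m ih =>
    by_cases h3 : m ≤ 3
    · -- m ∈ {1,2,3}: unroll the range fully, no recursion
      interval_cases m
      · rw [PySem.List.pyRange_neg_one_cons (by omega), PySem.List.pyRange_neg_one_eq_nil (by omega),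
            show ((1:Nat):Int) - 1 = ((0:Nat):Int) by omega]
        simp only [List.foldl, pvStepA, pvGet l 0 (by omega)]
        rw [pvG_short _ (by rw [List.length_take]; omega), pvTake1 l (by omega)]
        norm_num
      · rw [PySem.List.pyRange_neg_one_cons (by omega), PySem.List.pyRange_neg_one_cons (by omega),
            PySem.List.pyRange_neg_one_eq_nil (by omega),
            show ((2:Nat):Int) - 1 = ((1:Nat):Int) by omega,
            show ((1:Nat):Int) - 1 = ((0:Nat):Int) by omega]
        simp only [List.foldl, pvStepA, pvGet l 0 (by omega), pvGet l 1 (by omega)]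
        rw [pvG_short _ (by rw [List.length_take]; omega), pvTake2 l (by omega)]
        norm_num
      · rw [PySem.List.pyRange_neg_one_cons (by omega), PySem.List.pyRange_neg_one_cons (by omega),
            PySem.List.pyRange_neg_one_cons (by omega), PySem.List.pyRange_neg_one_eq_nil (by omega),
            show ((3:Nat):Int) - 1 = ((2:Nat):Int) by omega,
            show ((2:Nat):Int) - 1 = ((1:Nat):Int) by omega,
            show ((1:Nat):Int) - 1 = ((0:Nat):Int) by omega]
        simp only [List.foldl, pvStepA, pvGet l 0 (by omega), pvGet l 1 (by omega),
                   pvGet l 2 (by omega)]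
        rw [pvG_short _ (by rw [List.length_take]; omega), pvTake3 l (by omega)]
        norm_num
    · -- m ≥ 4: three explicit steps, then the induction hypothesis at m - 3
      push_neg at h3
      rw [PySem.List.pyRange_neg_one_cons (by omega), PySem.List.pyRange_neg_one_cons (by omega),
          PySem.List.pyRange_neg_one_cons (by omega),
          show (m : Int) - 1 = ((m - 1 : Nat) : Int) by omega,
          show ((m - 1 : Nat) : Int) - 1 = ((m - 2 : Nat) : Int) by omega,
          show ((m - 2 : Nat) : Int) - 1 = ((m - 3 : Nat) : Int) by omega]
      simp only [List.foldl, pvStepA, pvGet l (m-1) (by omega), pvGet l (m-2) (by omega),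
                 pvGet l (m-3) (by omega)]
      norm_num
      rw [ih (m - 3) (by omega) (by omega) (by omega)]
      simp only [Prod.mk.injEq]
      constructor
      · have hlen : (l.take m).length = m := by rw [List.length_take]; omega
        rw [pvG_long (l.take m) (by omega), hlen, List.take_take, List.drop_take,
            show min (m - 3) m = m - 3 by omega, show m - (m - 3) = 3 by omega,
            pvDrop3 l m (by omega) hm]
        simp
      · omega

-- str(num) is never empty
lemma pvToChars_ne_nil (num : Int) : 0 < (PySem.Int.toChars num).length := by
  unfold PySem.Int.toChars
  split
  · simp
  · exact Nat.length_toDigits_pos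

-- A computes pvG
lemma pvA_eq_pvG (l : List Char) (hl : 0 < l.length) :
    ((PySem.List.pyRange ((l.length : Int) - 1) (-1) (-1)).foldl (pvStepA l) ([], 0)).1 = pvG l := by
  by_cases h3 : l.length ≤ 3
  · -- no dot is ever emitted
    have h1 : l.length = 1 ∨ l.length = 2 ∨ l.length = 3 := by omega
    rcases h1 with h | h | h
    · rw [h, PySem.List.pyRange_neg_one_cons (by omega), PySem.List.pyRange_neg_one_eq_nil (by omega),
          show ((1:Nat):Int) - 1 = ((0:Nat):Int) by omega]
      simp only [List.foldl, pvStepA, pvGet l 0 (by omega)]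
      rw [pvG_short _ (by omega)]
      norm_num
      rw [← pvTake1 l (by omega)]
      exact List.take_of_length_le (by omega)
    · rw [h, PySem.List.pyRange_neg_one_cons (by omega), PySem.List.pyRange_neg_one_cons (by omega),
          PySem.List.pyRange_neg_one_eq_nil (by omega),
          show ((2:Nat):Int) - 1 = ((1:Nat):Int) by omega,
          show ((1:Nat):Int) - 1 = ((0:Nat):Int) by omega]
      simp only [List.foldl, pvStepA, pvGet l 0 (by omega), pvGet l 1 (by omega)]
      rw [pvG_short _ (by omega)]
      norm_num
      rw [← pvTake2 l (by omega)]
      exact List.take_of_length_le (by omega)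
    · rw [h, PySem.List.pyRange_neg_one_cons (by omega), PySem.List.pyRange_neg_one_cons (by omega),
          PySem.List.pyRange_neg_one_cons (by omega), PySem.List.pyRange_neg_one_eq_nil (by omega),
          show ((3:Nat):Int) - 1 = ((2:Nat):Int) by omega,
          show ((2:Nat):Int) - 1 = ((1:Nat):Int) by omega,
          show ((1:Nat):Int) - 1 = ((0:Nat):Int) by omega]
      simp only [List.foldl, pvStepA, pvGet l 0 (by omega), pvGet l 1 (by omega),
                 pvGet l 2 (by omega)]
      rw [pvG_short _ (by omega)]
      norm_num
      rw [← pvTake3 l (by omega)]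
      exact List.take_of_length_le (by omega)
  · -- length ≥ 4: three steps from j = 0, then pvA_loop
    push_neg at h3
    rw [PySem.List.pyRange_neg_one_cons (by omega), PySem.List.pyRange_neg_one_cons (by omega),
        PySem.List.pyRange_neg_one_cons (by omega),
        show (l.length : Int) - 1 = ((l.length - 1 : Nat) : Int) by omega,
        show ((l.length - 1 : Nat) : Int) - 1 = ((l.length - 2 : Nat) : Int) by omega,
        show ((l.length - 2 : Nat) : Int) - 1 = ((l.length - 3 : Nat) : Int) by omega]
    simp only [List.foldl, pvStepA, pvGet l (l.length - 1) (by omega),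
               pvGet l (l.length - 2) (by omega), pvGet l (l.length - 3) (by omega)]
    norm_num
    rw [pvA_loop l (l.length - 3) (by omega) (by omega)]
    rw [pvG_long l (by omega),
        show l.drop (l.length - 3) = (l.drop (l.length - 3)).take 3 from
          (List.take_of_length_le (by simp; omega)).symm,
        pvDrop3 l l.length (by omega) (by omega)]

-- ===== VERDICT (by name: the statement is the Claim_ definition above) =====
theorem int_to_str_spec : Claim_equal_int_to_str := by
  intro num _
  show int_to_str num = int_to_str_alt num
  have hA := pvA_eq_pvG (PySem.Int.toChars num) (pvToChars_ne_nil num)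
  have hB := pvB_eq_pvG (PySem.Int.toChars num) (PySem.Int.toChars num).length (le_refl _)
  rw [List.take_length] at hB
  unfold int_to_str int_to_str_alt
  simp only [hA, hB]
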